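-- pv_equiv track=rewrite | github.com/Nancy194/python100 | log_for_c.py | end_location
-- ===== SOURCE A (Python) =====
-- returnstring='''     LOGD("--%s",__func__); \n'''
--
-- def end_location(alllist):
--     '''
--     添加函数结束log，但是log在return之后
--     :param alllist:
--     :return:
--     '''
--     linenumber=0
--     for s in alllist:
--         linenumber+=1
--         s1=s.strip().split(' ')
--         if s1[0]=='return':
--             alllist.insert(linenumber,returnstring)
--     return alllist
-- ===== SOURCE B (Python) =====
-- returnstring='''     LOGD("--%s",__func__); \n'''
--
-- def end_location(alllist):
--     alllist[:] = [x for s in alllist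
--                     for x in ([s, returnstring] if s.strip().split(' ')[0] == 'return' else [s])]
--     return alllist
-- ===== Notes on version B (the rewrite author's own statement) =====
-- stated objective: simpler
-- what changed: A walks the list with a running line counter and repeatedly insert()s into the list it is iterating (stepping over each freshly inserted log line); B builds the whole result in one flat comprehension (each line maps to itself or to itself plus the log line) and writes it back with a single slice assignment.
import Mathlib
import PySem

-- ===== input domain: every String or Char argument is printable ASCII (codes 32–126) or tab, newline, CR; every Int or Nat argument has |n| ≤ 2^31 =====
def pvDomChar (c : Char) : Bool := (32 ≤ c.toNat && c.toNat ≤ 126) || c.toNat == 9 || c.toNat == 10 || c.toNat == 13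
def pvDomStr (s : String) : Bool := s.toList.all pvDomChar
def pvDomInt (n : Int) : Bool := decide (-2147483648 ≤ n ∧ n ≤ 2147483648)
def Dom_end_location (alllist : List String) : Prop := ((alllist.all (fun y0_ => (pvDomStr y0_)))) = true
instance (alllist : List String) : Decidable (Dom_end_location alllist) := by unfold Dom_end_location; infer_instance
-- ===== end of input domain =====

-- B replaces A's counter-driven insert-while-iterating loop by one flat comprehension
-- written back with a slice assignment (simpler); equivalence is about the return value,
-- and both Pythons leave the argument list in the same final state.

-- the module constant returnstring (5 leading spaces, one space before the newline)
def pvReturnString : String := "     LOGD(\"--%s\",__func__); \n"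

-- s.strip().split(' ')[0] == 'return'  (split with an explicit separator always yields a
-- nonempty list, so [0] is its head and never raises)
def pvIsReturn (s : String) : Bool :=
  ((PySem.Chars.splitOn (PySem.Chars.strip s.toList) [' ']).headD []) == "return".toList

-- ===== PORT A =====
-- Python's for-loop over the list A itself mutates is modeled as a cursor: `acc` the
-- already-visited prefix (reversed) and `rest` the part still ahead of the cursor;
-- `alllist.insert(linenumber, returnstring)` inserts directly behind the cursor, i.e. at
-- the front of `rest` (so the inserted line is itself visited next, exactly as in CPython).
-- The fuel guard only makes the loop total; 2*len+1 fuel is never exhausted.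
def end_locationLoop : Nat → List String → List String → List String
  | 0, acc, rest => acc.reverse ++ rest
  | _ + 1, acc, [] => acc.reverse
  | fuel + 1, acc, s :: rest =>
      if pvIsReturn s then end_locationLoop fuel (s :: acc) (pvReturnString :: rest)
      else end_locationLoop fuel (s :: acc) rest

def end_location (alllist : List String) : List String :=
  end_locationLoop (2 * alllist.length + 1) [] alllist

-- ===== PORT B =====
def end_location_alt (alllist : List String) : List String :=
  alllist.flatMap (fun s => if pvIsReturn s then [s, pvReturnString] else [s])

-- ===== PRECONDITION & SPEC =====
def Spec_end_location (alllist : List String) (out : List String) : Prop := out = end_location_alt alllist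
instance (alllist : List String) (out : List String) : Decidable (Spec_end_location alllist out) := by unfold Spec_end_location; infer_instance

-- ===== CLAIM (what is proved, stated in full; the proofs are below) =====
def Claim_equal_end_location : Prop := ∀ (alllist : List String), Dom_end_location alllist → Spec_end_location alllist (end_location alllist)

-- ===== LEMMAS AND PROOFS =====

theorem pvIsReturn_returnstring : pvIsReturn pvReturnString = false := by decide

theorem end_locationLoop_eq_flatMap (rest : List String) :
    ∀ (acc : List String) (fuel : Nat), 2 * rest.length < fuel →
      end_locationLoop fuel acc rest =
        acc.reverse ++ rest.flatMap (fun s => if pvIsReturn s then [s, pvReturnString] else [s]) := by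
  induction rest with
  | nil =>
      intro acc fuel h
      cases fuel with
      | zero => omega
      | succ f => simp [end_locationLoop]
  | cons s rest ih =>
      intro acc fuel h
      cases fuel with
      | zero => simp at h
      | succ f =>
        by_cases hs : pvIsReturn s = true
        · -- the inserted log line is visited next and never matches
          cases f with
          | zero => simp [List.length_cons] at h
          | succ g =>
            have hg : 2 * rest.length < g := by simp [List.length_cons] at h; omega
            simp only [end_locationLoop, hs, if_true, pvIsReturn_returnstring,
              Bool.false_eq_true, if_false]
            rw [ih (pvReturnString :: s :: acc) g hg]
            simp [hs]
        · have hf : 2 * rest.length < f := by simp [List.length_cons] at h; omega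
          simp only [end_locationLoop, hs]
          rw [ih (s :: acc) f hf]
          simp [hs]

-- ===== VERDICT (by name: the statement is the Claim_ definition above) =====
theorem end_location_spec : Claim_equal_end_location := by
  intro alllist _
  unfold Spec_end_location end_location end_location_alt
  rw [end_locationLoop_eq_flatMap alllist [] (2 * alllist.length + 1) (by omega)]
  simp
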